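-- pv_equiv track=rewrite | github.com/fenwaypowers/Placeback-Solution | placeback.py | placeback
-- ===== SOURCE A (Python) =====
-- def placeback(sequence):
--   new = []
--   while True:
--     if len(sequence) == 1:
--       new.append(sequence[0])
--       break
--     num = sequence[0]
--     sequence.remove(num)
--     sequence.append(num)
--     new.append(sequence[0])
--     sequence.remove(sequence[0])
--   return new
-- ===== SOURCE B (Python) =====
-- def placeback(sequence):
--     new = []
--     i = 0
--     while len(sequence) > 1:
--         i = (i + 1) % len(sequence)
--         new.append(sequence[i])
--         del sequence[i]
--     new.append(sequence[0])
--     return new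
-- ===== Notes on version B (the rewrite author's own statement) =====
-- stated objective: alternative
-- what changed: Replaces A's rotate-front-to-back list rebuilding (remove+append each round) with an in-place Josephus-style index pointer i=(i+1)%len that selects and deletes the eliminated card directly, keeping the list in original order.
import Mathlib
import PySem

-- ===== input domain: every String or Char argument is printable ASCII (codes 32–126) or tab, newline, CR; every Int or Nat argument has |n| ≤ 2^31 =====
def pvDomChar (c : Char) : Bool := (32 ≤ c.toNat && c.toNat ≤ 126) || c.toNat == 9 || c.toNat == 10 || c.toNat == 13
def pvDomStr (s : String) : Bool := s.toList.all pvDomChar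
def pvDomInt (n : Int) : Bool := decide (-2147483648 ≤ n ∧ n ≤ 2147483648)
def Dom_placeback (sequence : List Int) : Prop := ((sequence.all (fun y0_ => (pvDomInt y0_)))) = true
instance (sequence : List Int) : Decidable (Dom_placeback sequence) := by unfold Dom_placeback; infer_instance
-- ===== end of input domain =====

-- B replaces A's rotate-and-rebuild elimination loop with an in-place index pointer (Josephus k=2);
-- both Pythons also mutate `sequence` to the single survivor, equally; the theorems are about the return value.


-- ===== PORT A =====
-- A's while loop: rotate the front card to the back, then record and remove the new front.
-- sequence.remove(num) with num = sequence[0] always deletes index 0 (first occurrence of that value).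
def placebackLoopA : List Int → List Int → List Int
  | [x], new => new ++ [x]
  | x :: y :: rest, new => placebackLoopA (rest ++ [x]) (new ++ [y])
  | [], new => new      -- unreachable under Pre_ (Python raises IndexError on empty input)
termination_by s _ => s.length
decreasing_by simp

def placeback (sequence : List Int) : List Int := placebackLoopA sequence []

-- ===== PORT B =====
-- B's while loop: advance the pointer by one modulo the current length, record that card,
-- delete it in place; the list keeps its original order throughout.
def placebackLoopB (seq : List Int) (i : Nat) (new : List Int) : List Int :=
  if _h : seq.length > 1 then
    placebackLoopB (seq.eraseIdx ((i + 1) % seq.length)) ((i + 1) % seq.length)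
      (new ++ [seq.getD ((i + 1) % seq.length) 0])
  else
    new ++ [seq.headD 0]   -- sequence[0]; under Pre_ the list is nonempty here
termination_by seq.length
decreasing_by
  have : (i + 1) % seq.length < seq.length := Nat.mod_lt _ (by omega)
  simp [List.length_eraseIdx, this]; omega

def placeback_alt (sequence : List Int) : List Int := placebackLoopB sequence 0 []

-- ===== PRECONDITION & SPEC =====
-- A raises IndexError on the empty list (sequence[0]); so does B.
def Pre_placeback (sequence : List Int) : Prop := sequence ≠ []
instance (sequence : List Int) : Decidable (Pre_placeback sequence) := by unfold Pre_placeback; infer_instance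
def pvWitness_placeback : List Int := ([1, 2, 3, 4, 5])

def Spec_placeback (sequence : List Int) (out : List Int) : Prop := out = placeback_alt sequence
instance (sequence : List Int) (out : List Int) : Decidable (Spec_placeback sequence out) := by unfold Spec_placeback; infer_instance

-- ===== CLAIM (what is proved, stated in full; the proofs are below) =====
def Claim_equal_placeback : Prop := ∀ (sequence : List Int), Dom_placeback sequence → Pre_placeback sequence → Spec_placeback sequence (placeback sequence)

-- ===== LEMMAS AND PROOFS =====

-- One A-step from the rotated view of B's list: the rotation exposes B's next recorded card
-- in second position, and rotating the erased list by the new pointer gives A's next list.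
theorem rot_step (seq : List Int) (h2 : 2 ≤ seq.length) (i : Nat) :
    ∃ a t, seq.rotate i = a :: seq.getD ((i + 1) % seq.length) 0 :: t ∧
      t ++ [a] = (seq.eraseIdx ((i + 1) % seq.length)).rotate ((i + 1) % seq.length) := by
  have hL0 : 0 < seq.length := by omega
  have hkL : i % seq.length < seq.length := Nat.mod_lt _ hL0
  have hj : (i + 1) % seq.length = (i % seq.length + 1) % seq.length := by
    conv_lhs => rw [Nat.add_mod i 1 seq.length, Nat.mod_eq_of_lt (show 1 < seq.length from h2)]
  have hrot : seq.rotate i = seq.rotate (i % seq.length) := (List.rotate_mod seq i).symm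
  rcases Nat.lt_or_ge (i % seq.length + 1) seq.length with hcase | hcase
  · -- pointer does not wrap: j = i % L + 1
    have hjv : (i + 1) % seq.length = i % seq.length + 1 := by
      rw [hj]; exact Nat.mod_eq_of_lt hcase
    refine ⟨seq.getD (i % seq.length) 0,
      seq.drop (i % seq.length + 1 + 1) ++ seq.take (i % seq.length), ?_, ?_⟩
    · rw [hrot, List.rotate_eq_drop_append_take hkL.le, hjv,
        List.drop_eq_getElem_cons hkL, List.drop_eq_getElem_cons hcase,
        List.getD_eq_getElem seq 0 hkL, List.getD_eq_getElem seq 0 hcase]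
      simp only [List.cons_append]
    · rw [hjv, List.eraseIdx_eq_take_drop_succ,
        List.rotate_eq_drop_append_take (by simp [List.length_take]; omega),
        List.drop_left' (by simp [List.length_take]; omega),
        List.take_left' (by simp [List.length_take]; omega),
        List.take_add_one, List.getElem?_eq_getElem hkL,
        List.getD_eq_getElem seq 0 hkL]
      simp
  · -- pointer wraps: i % L = L - 1, j = 0
    have hkv : i % seq.length + 1 = seq.length := by omega
    have hjv : (i + 1) % seq.length = 0 := by rw [hj, hkv]; exact Nat.mod_self _
    obtain ⟨s0, rest, rfl⟩ : ∃ s0 rest, seq = s0 :: rest := by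
      cases seq with
      | nil => simp at h2
      | cons a l => exact ⟨a, l, rfl⟩
    have hrl : i % (s0 :: rest).length = rest.length :=
      Nat.add_right_cancel (hkv.trans (List.length_cons))
    have hrne : rest ≠ [] := by
      intro hn; subst hn; simp at h2
    have hdropgen : ∀ (l : List Int) (hl : l ≠ []), l.drop (l.length - 1) = [l.getLast hl] := by
      intro l hl
      rw [List.drop_eq_getElem_cons (by cases l with | nil => simp at hl | cons a t => simp),
        List.drop_eq_nil_of_le (by omega)]
      simp [List.getLast_eq_getElem]
    have hdrop : (s0 :: rest).drop rest.length = [rest.getLast hrne] := by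
      have h1 := hdropgen (s0 :: rest) (by simp)
      simp only [List.length_cons, Nat.add_sub_cancel] at h1
      rw [h1, List.getLast_cons hrne]
    have htake : (s0 :: rest).take rest.length = s0 :: rest.dropLast := by
      rcases List.exists_cons_of_ne_nil hrne with ⟨r0, rtl, rfl⟩
      simp [List.dropLast_eq_take, List.take_succ_cons]
    refine ⟨rest.getLast hrne, rest.dropLast, ?_, ?_⟩
    · rw [hrot, List.rotate_eq_drop_append_take hkL.le, hjv, hrl, hdrop, htake]
      simp
    · rw [hjv]
      simp [List.dropLast_append_getLast hrne]

-- Invariant: A's working list is B's working list rotated to start just after B's pointer;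
-- strong induction on the length.
theorem loop_bridge : ∀ (n : Nat) (seq : List Int) (i : Nat) (new : List Int),
    seq.length = n → seq ≠ [] →
    placebackLoopA (seq.rotate i) new = placebackLoopB seq i new := by
  intro n
  induction n using Nat.strong_induction_on with
  | _ n ih =>
    intro seq i new hlen hne
    rw [placebackLoopB]
    by_cases h : seq.length > 1
    · rw [dif_pos h]
      obtain ⟨a, t, hr, ht⟩ := rot_step seq (by omega) i
      rw [hr]
      have hstep : placebackLoopA (a :: seq.getD ((i + 1) % seq.length) 0 :: t) new
          = placebackLoopA (t ++ [a]) (new ++ [seq.getD ((i + 1) % seq.length) 0]) := by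
        rw [placebackLoopA]
      rw [hstep, ht]
      have hjlt : (i + 1) % seq.length < seq.length := Nat.mod_lt _ (by omega)
      have hlen' : (seq.eraseIdx ((i + 1) % seq.length)).length = n - 1 := by
        simp [List.length_eraseIdx, hjlt]; omega
      exact ih (n - 1) (by omega) _ _ _ hlen'
        (by intro hnil; rw [hnil] at hlen'; simp at hlen'; omega)
    · rw [dif_neg h]
      have : seq.length = 1 := by
        cases seq with
        | nil => exact absurd rfl hne
        | cons a l => simp at h ⊢; omega
      obtain ⟨x, rfl⟩ := List.length_eq_one_iff.mp this
      simp [placebackLoopA]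

-- ===== VERDICT (by name: the statement is the Claim_ definition above) =====
theorem placeback_spec : Claim_equal_placeback := by
  intro sequence _ hpre
  unfold Spec_placeback placeback placeback_alt
  have := loop_bridge sequence.length sequence 0 [] rfl hpre
  simpa using this
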